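-- pv_equiv track=rewrite | github.com/cahitbarankilinc/Polymarket_CopyBot | outcome_watcher.py | _pick_outcome
-- ===== SOURCE A (Python) =====
-- from typing import Any, Dict, List, Optional, Tuple
--
-- def _norm(s: str) -> str:
--     return " ".join(str(s).strip().lower().split())
--
-- def _pick_outcome(outcomes: List[str], wanted: str) -> Optional[int]:
--     wn = _norm(wanted)
--     for i, o in enumerate(outcomes):
--         if _norm(o) == wn:
--             return i
--     for i, o in enumerate(outcomes):
--         if wn and wn in _norm(o):
--             return i
--     return None
-- ===== SOURCE B (Python) =====
-- def _norm(s: str) -> str: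
--     return " ".join(str(s).strip().lower().split())
--
-- def _pick_outcome(outcomes, wanted):
--     wn = _norm(wanted)
--     sub = None
--     for i, o in enumerate(outcomes):
--         n = _norm(o)
--         if n == wn:
--             return i
--         if wn and sub is None and wn in n:
--             sub = i
--     return sub
-- ===== Notes on version B (the rewrite author's own statement) =====
-- stated objective: faster
-- what changed: Fused A's two sequential scans (each re-normalizing every element) into a single pass that normalizes each outcome once, returning an exact match immediately and remembering the first substring match as a pending result.
import Mathlib
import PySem

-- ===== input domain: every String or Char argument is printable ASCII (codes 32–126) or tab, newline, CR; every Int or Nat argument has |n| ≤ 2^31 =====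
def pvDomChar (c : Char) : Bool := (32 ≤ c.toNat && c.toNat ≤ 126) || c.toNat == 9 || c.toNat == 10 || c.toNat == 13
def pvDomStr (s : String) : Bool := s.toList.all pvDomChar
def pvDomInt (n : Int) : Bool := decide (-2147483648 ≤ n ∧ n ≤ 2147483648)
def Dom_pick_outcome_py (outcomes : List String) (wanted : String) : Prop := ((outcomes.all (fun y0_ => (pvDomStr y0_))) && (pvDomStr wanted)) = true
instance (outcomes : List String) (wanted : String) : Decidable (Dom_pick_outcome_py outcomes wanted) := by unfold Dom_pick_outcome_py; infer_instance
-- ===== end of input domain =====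

-- B fuses A's two normalizing scans into one pass (each outcome normalized once,
-- first substring match kept pending, exact match returned immediately); proved equal to A.

-- ===== PORT A =====
-- _norm(s) = " ".join(s.strip().lower().split())
def pvNorm (s : String) : String :=
  PySem.Str.join " " (PySem.Str.split₀ (PySem.Str.lower (PySem.Str.strip s)))

-- first loop of A: first i with _norm(o) == wn
def pvLoopExact (wn : String) : List String → Int → Option Int
  | [], _ => none
  | o :: rest, i => if pvNorm o = wn then some i else pvLoopExact wn rest (i + 1)

-- second loop of A: first i with wn nonempty and wn in _norm(o)
def pvLoopSub (wn : String) : List String → Int → Option Int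
  | [], _ => none
  | o :: rest, i =>
    if wn ≠ "" ∧ PySem.Str.isIn wn (pvNorm o) = true then some i
    else pvLoopSub wn rest (i + 1)

def pick_outcome_py (outcomes : List String) (wanted : String) : Option Int :=
  let wn := pvNorm wanted
  match pvLoopExact wn outcomes 0 with
  | some i => some i
  | none => pvLoopSub wn outcomes 0

-- ===== PORT B =====
-- single pass: exact match returns immediately; first substring match recorded as `sub`
def pvLoopB (wn : String) : List String → Int → Option Int → Option Int
  | [], _, sub => sub
  | o :: rest, i, sub =>
    let n := pvNorm o
    if n = wn then some i
    else if wn ≠ "" ∧ sub = none ∧ PySem.Str.isIn wn n = true then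
      pvLoopB wn rest (i + 1) (some i)
    else
      pvLoopB wn rest (i + 1) sub

def pick_outcome_py_alt (outcomes : List String) (wanted : String) : Option Int :=
  pvLoopB (pvNorm wanted) outcomes 0 none

-- ===== PRECONDITION & SPEC =====
def Spec_pick_outcome_py (outcomes : List String) (wanted : String) (out : Option Int) : Prop := out = pick_outcome_py_alt outcomes wanted
instance (outcomes : List String) (wanted : String) (out : Option Int) : Decidable (Spec_pick_outcome_py outcomes wanted out) := by unfold Spec_pick_outcome_py; infer_instance

-- ===== CLAIM (what is proved, stated in full; the proofs are below) =====
def Claim_equal_pick_outcome_py : Prop := ∀ (outcomes : List String) (wanted : String), Dom_pick_outcome_py outcomes wanted → Spec_pick_outcome_py outcomes wanted (pick_outcome_py outcomes wanted)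

-- ===== LEMMAS AND PROOFS =====

-- B's fused loop equals: A's exact scan, else the pending index, else A's substring scan.
theorem pvLoopB_eq (wn : String) (xs : List String) (i : Int) (sub : Option Int) :
    pvLoopB wn xs i sub =
      match pvLoopExact wn xs i with
      | some j => some j
      | none =>
        match sub with
        | some p => some p
        | none => pvLoopSub wn xs i := by
  induction xs generalizing i sub with
  | nil => cases sub <;> simp [pvLoopB, pvLoopExact, pvLoopSub]
  | cons o rest ih =>
    simp only [pvLoopB, pvLoopExact, pvLoopSub]
    by_cases hx : pvNorm o = wn
    · simp [hx]
    · simp only [hx, if_false]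
      by_cases hc : wn ≠ "" ∧ sub = none ∧ PySem.Str.isIn wn (pvNorm o) = true
      · simp only [hc, ih]
        have hs : (wn ≠ "" ∧ PySem.Str.isIn wn (pvNorm o) = true) := ⟨hc.1, hc.2.2⟩
        simp [hs]
      · simp only [hc, if_false, ih]
        cases hsub : sub with
        | some p => rfl
        | none =>
          have hns : ¬ (¬ wn = "" ∧ PySem.Chars.isIn wn.toList (pvNorm o).toList = true) := by
            intro h; exact hc ⟨h.1, hsub, by simpa using h.2⟩
          simp [hns]

-- ===== VERDICT (by name: the statement is the Claim_ definition above) =====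
theorem pick_outcome_py_spec : Claim_equal_pick_outcome_py := by
  intro outcomes wanted _
  unfold Spec_pick_outcome_py pick_outcome_py pick_outcome_py_alt
  rw [pvLoopB_eq]
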